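-- pv_equiv track=rewrite | github.com/Kishan1835/100xDevs-Pro | ppt-auto/transfer.py | _pick_title
-- ===== SOURCE A (Python) =====
-- _STATUS_WORDS = {
--     'HEALTHY', 'ALERT', 'CRITICAL', 'WARNING', 'ERROR', 'OK',
--     'YES', 'NO', 'ON', 'OFF', 'HIGH', 'LOW', 'PASS', 'FAIL',
-- }
--
-- def _pick_title(raw_texts):
--     """
--     FIX 3: Better title detection.
--     Priority order:
--       1. Non-caps string that looks like a proper heading (≥10 chars, mixed case, depth 0-1)
--       2. ALL-CAPS string ≥ 8 chars (long enough to be a real heading, not a status word)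
--       3. First text ≥ 4 chars as fallback
--     Never pick known status words or strings < 4 chars.
--     """
--     if not raw_texts:
--         return ""
--
--     # Priority 1: mixed-case heading-like strings at top depth
--     for d, t in raw_texts:
--         if (len(t) >= 8
--                 and t not in _STATUS_WORDS
--                 and not t.startswith('[')
--                 and not t[0].isdigit()
--                 and '\n' not in t
--                 and d <= 1):
--             # Check it looks heading-like: starts with capital, reasonable length
--             if t[0].isupper() and len(t) <= 80:
--                 return t
--
--     # Priority 2: long ALL-CAPS strings (real headings, not labels)
--     allcaps = [
--         (d, t) for d, t in raw_texts
--         if t.upper() == t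
--         and len(t) >= 8          # must be >= 8 chars (rules out HEALTHY, ALERT, etc.)
--         and t not in _STATUS_WORDS
--         and not t.startswith('[')
--         and not t[0].isdigit()
--         and '\n' not in t
--     ]
--     if allcaps:
--         allcaps.sort(key=lambda x: -len(x[1]))
--         return allcaps[0][1]
--
--     # Fallback: first text >= 4 chars that is not a status word
--     for _, t in raw_texts:
--         if len(t) >= 4 and t not in _STATUS_WORDS:
--             return t
--     return raw_texts[0][1] if raw_texts else ""
-- ===== SOURCE B (Python) =====
-- _STATUS_WORDS = {
--     'HEALTHY', 'ALERT', 'CRITICAL', 'WARNING', 'ERROR', 'OK',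
--     'YES', 'NO', 'ON', 'OFF', 'HIGH', 'LOW', 'PASS', 'FAIL',
-- }
--
-- def _pick_title(raw_texts):
--     """Single pass keeping three running candidates (P1 first match,
--     P2 longest with first-on-tie, P3 first match), then priority choice."""
--     if not raw_texts:
--         return ""
--     p1 = p2 = p3 = None
--     for d, t in raw_texts:
--         base = (len(t) >= 8
--                 and t not in _STATUS_WORDS
--                 and not t.startswith('[')
--                 and not t[0].isdigit()
--                 and '\n' not in t)
--         if p1 is None and base and d <= 1 and t[0].isupper() and len(t) <= 80:
--             p1 = t
--         if base and t.upper() == t and (p2 is None or len(t) > len(p2)):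
--             p2 = t
--         if p3 is None and len(t) >= 4 and t not in _STATUS_WORDS:
--             p3 = t
--     if p1 is not None:
--         return p1
--     if p2 is not None:
--         return p2
--     if p3 is not None:
--         return p3
--     return raw_texts[0][1]
-- ===== Notes on version B (the rewrite author's own statement) =====
-- stated objective: alternative
-- what changed: Replaced A's three sequential scans plus a stable sort of the all-caps candidates with a single pass that maintains three running candidates (first Priority-1 match, longest-first-on-tie Priority-2 match, first Priority-3 match) and picks them in priority order afterwards.
import Mathlib
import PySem

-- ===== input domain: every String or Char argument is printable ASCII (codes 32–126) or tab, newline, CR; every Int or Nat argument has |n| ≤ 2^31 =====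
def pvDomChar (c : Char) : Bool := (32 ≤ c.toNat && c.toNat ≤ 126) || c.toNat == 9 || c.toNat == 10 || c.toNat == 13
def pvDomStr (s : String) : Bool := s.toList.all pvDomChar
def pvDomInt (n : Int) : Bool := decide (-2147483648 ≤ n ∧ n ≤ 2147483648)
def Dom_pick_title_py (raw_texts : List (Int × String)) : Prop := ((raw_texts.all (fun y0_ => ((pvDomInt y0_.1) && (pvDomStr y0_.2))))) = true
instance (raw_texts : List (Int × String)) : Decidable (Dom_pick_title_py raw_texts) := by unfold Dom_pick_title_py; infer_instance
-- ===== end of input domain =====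

-- B replaces A's three sequential scans plus a stable sort with one fold that maintains the
-- three running candidates (objective: alternative single-pass decomposition, same result).

-- ===== PORT A =====
def pvStatusWords : List String :=
  ["HEALTHY", "ALERT", "CRITICAL", "WARNING", "ERROR", "OK",
   "YES", "NO", "ON", "OFF", "HIGH", "LOW", "PASS", "FAIL"]

-- t[0].isdigit() / t[0].isupper(); in both Pythons this is evaluated only after len(t) >= 8,
-- so the `none` branch (empty string, Python IndexError) is unreachable where it is used.
def pvFirstDigit (t : String) : Bool :=
  match PySem.Str.pyGet? t 0 with
  | some c => PySem.Chars.isdigit c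
  | none => false

def pvFirstUpper (t : String) : Bool :=
  match PySem.Str.pyGet? t 0 with
  | some c => PySem.Chars.isupper c
  | none => false

-- Priority-1 for-loop of A (returns on first full match, else continues)
def pvLoop1 : List (Int × String) → Option String
  | [] => none
  | (d, t) :: rest =>
    if decide (8 ≤ PySem.Str.len t) && !(pvStatusWords.contains t)
        && !(PySem.Str.startswith t "[") && !(pvFirstDigit t)
        && !(PySem.Str.isIn "\n" t) && decide (d ≤ 1) then
      if pvFirstUpper t && decide (PySem.Str.len t ≤ 80) then some t else pvLoop1 rest
    else pvLoop1 rest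

-- Priority-2 filter predicate of A (the comprehension's condition, in A's order)
def pvCond2 (t : String) : Bool :=
  (PySem.Str.upper t == t) && decide (8 ≤ PySem.Str.len t) && !(pvStatusWords.contains t)
    && !(PySem.Str.startswith t "[") && !(pvFirstDigit t) && !(PySem.Str.isIn "\n" t)

-- Fallback for-loop of A
def pvLoop3 : List (Int × String) → Option String
  | [] => none
  | (_, t) :: rest =>
    if decide (4 ≤ PySem.Str.len t) && !(pvStatusWords.contains t) then some t
    else pvLoop3 rest

def pick_title_py (raw_texts : List (Int × String)) : String :=
  if raw_texts.isEmpty then ""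
  else
    match pvLoop1 raw_texts with
    | some t => t
    | none =>
      let allcaps := raw_texts.filter (fun x => pvCond2 x.2)
      if !allcaps.isEmpty then
        -- allcaps.sort(key=lambda x: -len(x[1])); return allcaps[0][1]
        (PySem.List.pyGetD (PySem.List.sorted allcaps (fun x => -(PySem.Str.len x.2)) false)
          0 ((0 : Int), "")).2
      else
        match pvLoop3 raw_texts with
        | some t => t
        | none =>
          match raw_texts.head? with
          | some p => p.2
          | none => ""

-- ===== PORT B =====
-- the three candidate updates of Source B's single loop body (base, then each `if`)
def pvBaseB (t : String) : Bool :=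
  decide (8 ≤ PySem.Str.len t) && !(pvStatusWords.contains t)
    && !(PySem.Str.startswith t "[") && !(pvFirstDigit t) && !(PySem.Str.isIn "\n" t)

def pvUpd1 (p1 : Option String) (d : Int) (t : String) : Option String :=
  if p1.isNone && pvBaseB t && decide (d ≤ 1) && pvFirstUpper t
      && decide (PySem.Str.len t ≤ 80) then some t else p1

def pvUpd2 (p2 : Option String) (t : String) : Option String :=
  if pvBaseB t && (PySem.Str.upper t == t)
      && (match p2 with
          | none => true
          | some u => decide (PySem.Str.len u < PySem.Str.len t)) then some t else p2

def pvUpd3 (p3 : Option String) (t : String) : Option String :=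
  if p3.isNone && decide (4 ≤ PySem.Str.len t) && !(pvStatusWords.contains t) then some t
  else p3

def pick_title_py_alt (raw_texts : List (Int × String)) : String :=
  if raw_texts.isEmpty then ""
  else
    match raw_texts.foldl
        (fun s x => (pvUpd1 s.1 x.1 x.2, pvUpd2 s.2.1 x.2, pvUpd3 s.2.2 x.2))
        ((none, none, none) : Option String × Option String × Option String) with
    | (some t, _, _) => t
    | (none, some t, _) => t
    | (none, none, some t) => t
    | (none, none, none) =>
      match raw_texts.head? with
      | some p => p.2
      | none => ""

-- ===== PRECONDITION & SPEC =====
def Spec_pick_title_py (raw_texts : List (Int × String)) (out : String) : Prop := out = pick_title_py_alt raw_texts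
instance (raw_texts : List (Int × String)) (out : String) : Decidable (Spec_pick_title_py raw_texts out) := by unfold Spec_pick_title_py; infer_instance

-- ===== CLAIM (what is proved, stated in full; the proofs are below) =====
def Claim_equal_pick_title_py : Prop := ∀ (raw_texts : List (Int × String)), Dom_pick_title_py raw_texts → Spec_pick_title_py raw_texts (pick_title_py raw_texts)

-- ===== LEMMAS AND PROOFS =====

-- the fold of B's port splits into three independent folds
theorem pvFold_split (xs : List (Int × String)) (p1 p2 p3 : Option String) :
    xs.foldl (fun s x => (pvUpd1 s.1 x.1 x.2, pvUpd2 s.2.1 x.2, pvUpd3 s.2.2 x.2)) (p1, p2, p3)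
      = (xs.foldl (fun s x => pvUpd1 s x.1 x.2) p1,
         xs.foldl (fun s x => pvUpd2 s x.2) p2,
         xs.foldl (fun s x => pvUpd3 s x.2) p3) := by
  induction xs generalizing p1 p2 p3 with
  | nil => rfl
  | cons x xs ih => simp [List.foldl_cons, ih]

theorem pvFold1_some (xs : List (Int × String)) (t : String) :
    xs.foldl (fun s x => pvUpd1 s x.1 x.2) (some t) = some t := by
  induction xs with
  | nil => rfl
  | cons x xs ih => simpa [pvUpd1] using ih

theorem pvUpd1_none (d : Int) (t : String) :
    pvUpd1 none d t =
      if decide (8 ≤ PySem.Str.len t) && !(pvStatusWords.contains t)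
          && !(PySem.Str.startswith t "[") && !(pvFirstDigit t)
          && !(PySem.Str.isIn "\n" t) && decide (d ≤ 1) then
        if pvFirstUpper t && decide (PySem.Str.len t ≤ 80) then some t else none
      else none := by
  unfold pvUpd1 pvBaseB
  cases decide (8 ≤ PySem.Str.len t) <;> cases (pvStatusWords.contains t) <;>
    cases (PySem.Str.startswith t "[") <;> cases (pvFirstDigit t) <;>
    cases (PySem.Str.isIn "\n" t) <;> cases decide (d ≤ 1) <;>
    cases pvFirstUpper t <;> cases decide (PySem.Str.len t ≤ 80) <;> rfl

theorem pvFold1_eq_loop1 (xs : List (Int × String)) :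
    xs.foldl (fun s x => pvUpd1 s x.1 x.2) none = pvLoop1 xs := by
  induction xs with
  | nil => rfl
  | cons x xs ih =>
    obtain ⟨d, t⟩ := x
    simp only [List.foldl_cons]
    rw [pvUpd1_none]
    simp only [pvLoop1]
    split
    · split
      · exact pvFold1_some xs t
      · exact ih
    · exact ih

theorem pvFold3_some (xs : List (Int × String)) (t : String) :
    xs.foldl (fun s x => pvUpd3 s x.2) (some t) = some t := by
  induction xs with
  | nil => rfl
  | cons x xs ih => simpa [pvUpd3] using ih

theorem pvUpd3_none (t : String) :
    pvUpd3 none t =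
      if decide (4 ≤ PySem.Str.len t) && !(pvStatusWords.contains t) then some t else none := by
  unfold pvUpd3
  cases decide (4 ≤ PySem.Str.len t) <;> cases (pvStatusWords.contains t) <;> rfl

theorem pvFold3_eq_loop3 (xs : List (Int × String)) :
    xs.foldl (fun s x => pvUpd3 s x.2) none = pvLoop3 xs := by
  induction xs with
  | nil => rfl
  | cons x xs ih =>
    obtain ⟨d, t⟩ := x
    simp only [List.foldl_cons]
    rw [pvUpd3_none]
    simp only [pvLoop3]
    split
    · exact pvFold3_some xs t
    · exact ih

-- B's second condition equals A's comprehension condition (Bool reassociation/commutation)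
theorem pvBase_upper_eq_cond2 (t : String) :
    (pvBaseB t && (PySem.Str.upper t == t)) = pvCond2 t := by
  unfold pvBaseB pvCond2
  cases (PySem.Str.upper t == t) <;>
    cases decide (8 ≤ PySem.Str.len t) <;>
    cases (pvStatusWords.contains t) <;>
    cases (PySem.Str.startswith t "[") <;>
    cases (pvFirstDigit t) <;>
    cases (PySem.Str.isIn "\n" t) <;> rfl

-- B's second fold skips exactly the elements A's filter drops
theorem pvFold2_eq_filter (xs : List (Int × String)) (b : Option String) :
    xs.foldl (fun s x => pvUpd2 s x.2) b
      = (xs.filter (fun x => pvCond2 x.2)).foldl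
          (fun s x => if (match s with
              | none => true
              | some u => decide (PySem.Str.len u < PySem.Str.len x.2)) then some x.2 else s) b := by
  induction xs generalizing b with
  | nil => rfl
  | cons x xs ih =>
    simp only [List.foldl_cons, List.filter_cons, pvUpd2]
    rw [← pvBase_upper_eq_cond2]
    cases hc : (pvBaseB x.2 && (PySem.Str.upper x.2 == x.2)) with
    | true =>
      simp only [Bool.true_and]
      exact ih _
    | false =>
      simp only [Bool.false_and, Bool.false_eq_true, if_false]
      exact ih b

-- running strict-max over pairs, projected to the string
def pvMaxPair (b : Option (Int × String)) (ys : List (Int × String)) : Option (Int × String) :=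
  ys.foldl (fun s x => match s with
    | none => some x
    | some m => if decide (PySem.Str.len m.2 < PySem.Str.len x.2) then some x else some m) b

theorem pvFold2_eq_maxPair (ys : List (Int × String)) (b : Option (Int × String)) :
    ys.foldl (fun s x => if (match s with
        | none => true
        | some u => decide (PySem.Str.len u < PySem.Str.len x.2)) then some x.2 else s)
        (b.map Prod.snd)
      = (pvMaxPair b ys).map Prod.snd := by
  induction ys generalizing b with
  | nil => rfl
  | cons y ys ih =>
    cases b with
    | none => simpa [pvMaxPair, List.foldl_cons] using ih (some y)
    | some m =>
      simp only [pvMaxPair, List.foldl_cons, Option.map_some]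
      by_cases h : m.2.length < y.2.length
      · simpa [h, pvMaxPair] using ih (some y)
      · simpa [h, pvMaxPair] using ih (some m)

-- head of insertBy with the sort's "before" relation is the strict-max update
theorem pvHead_insertBy (x : Int × String) (acc : List (Int × String)) :
    (PySem.List.insertBy
        (fun a b => decide ((fun z => -(PySem.Str.len z.2)) a < (fun z => -(PySem.Str.len z.2)) b))
        x acc).head?
      = match acc.head? with
        | none => some x
        | some m => if decide (PySem.Str.len m.2 < PySem.Str.len x.2) then some x else some m := by
  cases acc with
  | nil => rfl
  | cons y ys =>
    simp only [PySem.List.insertBy, List.head?_cons]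
    have : (decide (-(PySem.Str.len x.2) < -(PySem.Str.len y.2)))
        = decide (PySem.Str.len y.2 < PySem.Str.len x.2) := by
      simp
    rw [this]
    cases h : decide (PySem.Str.len y.2 < PySem.Str.len x.2) <;> simp

theorem pvHead_sorted (ys : List (Int × String)) :
    (PySem.List.sorted ys (fun z => -(PySem.Str.len z.2)) false).head?
      = pvMaxPair none ys := by
  rw [PySem.List.sorted_eq_foldl_insertBy]
  suffices h : ∀ (ys : List (Int × String)) (acc : List (Int × String)),
      (ys.foldl (fun acc x => PySem.List.insertBy
          (fun a b => decide ((fun z => -(PySem.Str.len z.2)) a < (fun z => -(PySem.Str.len z.2)) b))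
          x acc) acc).head?
        = ys.foldl (fun s x => match s with
            | none => some x
            | some m => if decide (PySem.Str.len m.2 < PySem.Str.len x.2) then some x else some m)
            acc.head? by
    exact h ys []
  intro ys
  induction ys with
  | nil => intro acc; rfl
  | cons y t ih =>
    intro acc
    simp only [List.foldl_cons]
    rw [ih, pvHead_insertBy]

theorem pvMaxPair_none_iff (ys : List (Int × String)) :
    pvMaxPair none ys = none ↔ ys = [] := by
  cases ys with
  | nil => simp [pvMaxPair]
  | cons y t =>
    simp only [pvMaxPair, List.foldl_cons]
    constructor
    · intro h
      exfalso
      have : ∀ (b : Int × String) (l : List (Int × String)), pvMaxPair (some b) l ≠ none := by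
        intro b l
        induction l generalizing b with
        | nil => simp [pvMaxPair]
        | cons z l ih =>
          simp only [pvMaxPair, List.foldl_cons]
          cases h : decide (PySem.Str.len b.2 < PySem.Str.len z.2) <;> simpa [h, pvMaxPair] using ih _
      exact this y t h
    · intro h; cases h

-- ===== VERDICT (by name: the statement is the Claim_ definition above) =====
theorem pick_title_py_spec : Claim_equal_pick_title_py := by
  intro raw_texts _
  unfold Spec_pick_title_py pick_title_py pick_title_py_alt
  cases hE : raw_texts.isEmpty with
  | true => simp
  | false =>
    simp only [Bool.false_eq_true, if_false]
    rw [pvFold_split, pvFold1_eq_loop1, pvFold3_eq_loop3, pvFold2_eq_filter]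
    have h2 := pvFold2_eq_maxPair (raw_texts.filter (fun x => pvCond2 x.2)) none
    simp only [Option.map_none] at h2
    rw [h2]
    cases h1 : pvLoop1 raw_texts with
    | some t => rfl
    | none =>
      cases hF : raw_texts.filter (fun x => pvCond2 x.2) with
      | nil =>
        simp only [List.isEmpty_nil, Bool.not_true, Bool.false_eq_true, if_false]
        have : pvMaxPair none ([] : List (Int × String)) = none := rfl
        rw [this]
        cases h3 : pvLoop3 raw_texts with
        | some t => rfl
        | none => rfl
      | cons y ys =>
        have hne : (y :: ys : List (Int × String)) ≠ [] := by simp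
        have hmax : pvMaxPair none (y :: ys) ≠ none := by
          intro h; exact hne ((pvMaxPair_none_iff _).mp h)
        cases hm : pvMaxPair none (y :: ys) with
        | none => exact absurd hm hmax
        | some m =>
          simp only [List.isEmpty_cons, Bool.not_false, if_true, Option.map_some]
          -- A's side: sorted head is m, and pyGetD at 0 of a nonempty list is its head
          have hs := pvHead_sorted (y :: ys)
          rw [hm] at hs
          cases hsort : PySem.List.sorted (y :: ys) (fun z => -(PySem.Str.len z.2)) false with
          | nil =>
            exact absurd hsort (by
              intro h
              exact hne ((PySem.List.sorted_eq_nil_iff _ _ _).mp h))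
          | cons m' rest =>
            rw [hsort] at hs
            simp only [List.head?_cons, Option.some.injEq] at hs
            subst hs
            simp [PySem.List.pyGetD_zero_cons]
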